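-- pv_equiv track=rewrite | github.com/yuzheng0331/Reverse-Analysis-and-Automated-Security-Assessment-of-Web-API | scripts/capture_baseline_playwright.py | build_capture_batches
-- ===== SOURCE A (Python) =====
-- from collections import defaultdict
--
-- def build_capture_batches(endpoints, algo_batch=True):
--     """Build endpoint batches. When algo_batch=True, group by crypto algorithm set."""
--     if not algo_batch:
--         return [("all", list(endpoints))]
--
--     grouped = defaultdict(list)
--     for ep in endpoints:
--         meta = ep.get("meta", {}) if isinstance(ep, dict) else {}
--         algos = meta.get("crypto_algorithms") if isinstance(meta, dict) else None
--         if isinstance(algos, list) and algos: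
--             key = tuple(sorted(str(a).upper() for a in algos if a is not None))
--         elif isinstance(algos, str) and algos.strip():
--             key = (algos.strip().upper(),)
--         else:
--             key = ("UNKNOWN",)
--         grouped[key].append(ep)
--
--     ordered_keys = sorted(grouped.keys(), key=lambda item: (item == ("UNKNOWN",), item))
--     return [(",".join(key), grouped[key]) for key in ordered_keys]
-- ===== SOURCE B (Python) =====
-- def _capture_key(ep):
--     meta = ep.get("meta", {}) if isinstance(ep, dict) else {}
--     algos = meta.get("crypto_algorithms") if isinstance(meta, dict) else None
--     if isinstance(algos, list) and algos:
--         return tuple(sorted(str(a).upper() for a in algos if a is not None))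
--     if isinstance(algos, str) and algos.strip():
--         return (algos.strip().upper(),)
--     return ("UNKNOWN",)
--
-- def build_capture_batches(endpoints, algo_batch=True):
--     """Build endpoint batches. When algo_batch=True, group by crypto algorithm set."""
--     if not algo_batch:
--         return [("all", list(endpoints))]
--     keys = sorted({_capture_key(ep) for ep in endpoints},
--                   key=lambda k: (k == ("UNKNOWN",), k))
--     return [(",".join(k), [ep for ep in endpoints if _capture_key(ep) == k])
--             for k in keys]
-- ===== Notes on version B (the rewrite author's own statement) =====
-- stated objective: simpler
-- what changed: Replaces A's defaultdict accumulation followed by a key sort with: collect the set of distinct keys, sort them once, then emit each batch by a per-key filter pass over the endpoints (no grouping dict at all).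
import Mathlib
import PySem

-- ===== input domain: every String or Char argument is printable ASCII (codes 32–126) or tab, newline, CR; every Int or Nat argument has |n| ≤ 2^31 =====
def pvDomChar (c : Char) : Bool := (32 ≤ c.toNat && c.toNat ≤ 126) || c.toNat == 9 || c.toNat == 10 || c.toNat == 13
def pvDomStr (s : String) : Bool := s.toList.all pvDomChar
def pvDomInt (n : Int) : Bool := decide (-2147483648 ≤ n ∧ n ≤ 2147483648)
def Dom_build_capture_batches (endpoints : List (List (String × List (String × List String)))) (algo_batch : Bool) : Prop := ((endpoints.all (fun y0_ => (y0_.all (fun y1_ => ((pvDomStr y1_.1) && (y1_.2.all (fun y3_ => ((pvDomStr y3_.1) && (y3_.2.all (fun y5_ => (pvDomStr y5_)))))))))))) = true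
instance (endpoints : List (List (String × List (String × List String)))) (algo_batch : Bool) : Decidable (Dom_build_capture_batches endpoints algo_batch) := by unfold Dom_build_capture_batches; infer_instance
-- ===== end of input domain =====

-- B replaces A's defaultdict grouping by: sort the distinct keys, then one filter pass per key (simpler decomposition; return-value equivalence).
-- ===== PORT A =====
-- A's loop body inlined; the tuple sort key (key == ("UNKNOWN",), key) is ported as a marker-prefixed
-- list ("1" before the UNKNOWN key, "0" otherwise) — List String lex order equals Python's tuple order here.
-- The 'isinstance(algos, str)' branch is unreachable under the declared type (algos : Option (List String)) and is omitted.
def build_capture_batches (endpoints : List (List (String × List (String × List String)))) (algo_batch : Bool) : List (String × (List (List (String × List (String × List String))))) :=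
  if !algo_batch then [("all", endpoints)]
  else
    let grouped := endpoints.foldl (fun d ep =>
      let m := (PySem.Dict.mk ep).getD "meta" []
      let algos? := (PySem.Dict.mk m).get? "crypto_algorithms"
      let key : List String := match algos? with
        | some algos =>
            if algos ≠ [] then PySem.List.sorted (algos.map PySem.Str.upper) (fun s => s) false
            else ["UNKNOWN"]
        | none => ["UNKNOWN"]
      d.modify key [] (fun g => g ++ [ep])) PySem.Dict.empty
    let ordered_keys := PySem.List.sorted grouped.keys
      (fun k => (if k == ["UNKNOWN"] then ["1"] else ["0"]) ++ k) false
    ordered_keys.map (fun k => (PySem.Str.join "," k, grouped.getD k []))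

-- ===== PORT B =====
-- _capture_key of Source B (same unreachable isinstance-str branch omitted)
def pvCaptureKey (ep : List (String × List (String × List String))) : List String :=
  let m := (PySem.Dict.mk ep).getD "meta" []
  match (PySem.Dict.mk m).get? "crypto_algorithms" with
  | some algos =>
      if algos ≠ [] then PySem.List.sorted (algos.map PySem.Str.upper) (fun s => s) false
      else ["UNKNOWN"]
  | none => ["UNKNOWN"]

def build_capture_batches_alt (endpoints : List (List (String × List (String × List String)))) (algo_batch : Bool) : List (String × (List (List (String × List (String × List String))))) :=
  if !algo_batch then [("all", endpoints)]
  else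
    let keys := PySem.List.sorted (PySem.Set.ofList (endpoints.map pvCaptureKey))
      (fun k => (if k == ["UNKNOWN"] then ["1"] else ["0"]) ++ k) false
    keys.map (fun k => (PySem.Str.join "," k, endpoints.filter (fun ep => pvCaptureKey ep == k)))

-- ===== PRECONDITION & SPEC =====
def Spec_build_capture_batches (endpoints : List (List (String × List (String × List String)))) (algo_batch : Bool) (out : List (String × (List (List (String × List (String × List String)))))) : Prop := out = build_capture_batches_alt endpoints algo_batch
instance (endpoints : List (List (String × List (String × List String)))) (algo_batch : Bool) (out : List (String × (List (List (String × List (String × List String)))))) : Decidable (Spec_build_capture_batches endpoints algo_batch out) := by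
  unfold Spec_build_capture_batches
  -- instance search spins on this deeply nested type; the instance is given explicitly
  exact (@instDecidableEqList _ (@instDecidableEqProd _ _ inferInstance (@instDecidableEqList _ (@instDecidableEqList _ (@instDecidableEqProd _ _ inferInstance (@instDecidableEqList _ (@instDecidableEqProd _ _ inferInstance (@instDecidableEqList _ inferInstance)))))))) _ _

-- ===== CLAIM (what is proved, stated in full; the proofs are below) =====
def Claim_equal_build_capture_batches : Prop := ∀ (endpoints : List (List (String × List (String × List String)))) (algo_batch : Bool), Dom_build_capture_batches endpoints algo_batch → Spec_build_capture_batches endpoints algo_batch (build_capture_batches endpoints algo_batch)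


-- ===== LEMMAS AND PROOFS =====

-- A's grouping dict, written as a fold with pvCaptureKey (A's inlined key computation is definitionally pvCaptureKey).
theorem pvGroupedKeys (endpoints : List (List (String × List (String × List String)))) :
    (endpoints.foldl (fun d ep => d.modify (pvCaptureKey ep) [] (fun g => g ++ [ep]))
      (PySem.Dict.empty : PySem.Dict (List String) (List (List (String × List (String × List String)))))).keys
      = PySem.Set.ofList (endpoints.map pvCaptureKey) := by
  rw [PySem.Dict.keys_foldl_modify_key]
  simp [PySem.Dict.keys_empty, PySem.Set.update_eq_append_filter, PySem.Set.contains]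

theorem pvGroupedGetD (endpoints : List (List (String × List (String × List String)))) (k : List String) :
    (endpoints.foldl (fun d ep => d.modify (pvCaptureKey ep) [] (fun g => g ++ [ep]))
      (PySem.Dict.empty : PySem.Dict (List String) (List (List (String × List (String × List String)))))).getD k []
      = endpoints.filter (fun ep => pvCaptureKey ep == k) := by
  have h := PySem.Dict.getD_foldl_modify_append
    (l := endpoints.map (fun ep => (pvCaptureKey ep, ep)))
    (d := (PySem.Dict.empty : PySem.Dict (List String) (List (List (String × List (String × List String)))))) (c := k)
  rw [List.foldl_map] at h
  simpa [List.filter_map, Function.comp_def] using h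

-- ===== VERDICT (by name: the statement is the Claim_ definition above) =====
theorem build_capture_batches_spec : Claim_equal_build_capture_batches := by
  intro endpoints algo_batch _
  unfold Spec_build_capture_batches build_capture_batches build_capture_batches_alt
  cases algo_batch with
  | false => rfl
  | true =>
    simp only [Bool.not_true, if_neg (by decide : ¬ (false = true))]
    rw [show (fun (d : PySem.Dict (List String) (List (List (String × List (String × List String)))))
          (ep : List (String × List (String × List String))) =>
        let m := (PySem.Dict.mk ep).getD "meta" []
        let algos? := (PySem.Dict.mk m).get? "crypto_algorithms"
        let key : List String := match algos? with
          | some algos =>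
              if algos ≠ [] then PySem.List.sorted (algos.map PySem.Str.upper) (fun s => s) false
              else ["UNKNOWN"]
          | none => ["UNKNOWN"]
        d.modify key [] (fun g => g ++ [ep]))
        = (fun d ep => d.modify (pvCaptureKey ep) [] (fun g => g ++ [ep])) from rfl]
    rw [pvGroupedKeys]
    exact List.map_congr_left (fun k _ => by rw [pvGroupedGetD])
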